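-- pv_equiv track=rewrite | github.com/entwanne/advent-of-code | 2021/d23_p1.py | list_available_hallway
-- ===== SOURCE A (Python) =====
-- def list_available_hallway(game, i, energy):
--     hallway = game['hallway']
--     yield i, 0
--
--     nexts = []
--     if 0 < i < len(hallway):
--         nexts.append((i-1, -1, energy))
--     if 0 <= i < len(hallway) -1:
--         nexts.append((i+1, 1, energy))
--
--     while nexts:
--         i, d, cost = nexts.pop(0)
--         if hallway[i] is not None:
--             continue
--         yield i, cost
--         cost += energy
--         if 0 <= i+d < len(hallway):
--             nexts.append((i+d, d, cost))
-- ===== SOURCE B (Python) =====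
-- def list_available_hallway(game, i, energy):
--     hallway = game['hallway']
--     yield i, 0
--     n = len(hallway)
--     left = 0 < i < n
--     right = 0 <= i < n - 1
--     step = 1
--     while left or right:
--         if left:
--             j = i - step
--             if j < 0 or hallway[j] is not None:
--                 left = False
--             else:
--                 yield j, step * energy
--         if right:
--             j = i + step
--             if j >= n or hallway[j] is not None:
--                 right = False
--             else:
--                 yield j, step * energy
--         step += 1
-- ===== Notes on version B (the rewrite author's own statement) =====
-- stated objective: simpler
-- what changed: Replaces the explicit FIFO queue of (index, direction, cost) triples with a plain distance loop keeping two boolean 'still expanding' flags, yielding left then right at each distance with cost step*energy.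
import Mathlib
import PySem

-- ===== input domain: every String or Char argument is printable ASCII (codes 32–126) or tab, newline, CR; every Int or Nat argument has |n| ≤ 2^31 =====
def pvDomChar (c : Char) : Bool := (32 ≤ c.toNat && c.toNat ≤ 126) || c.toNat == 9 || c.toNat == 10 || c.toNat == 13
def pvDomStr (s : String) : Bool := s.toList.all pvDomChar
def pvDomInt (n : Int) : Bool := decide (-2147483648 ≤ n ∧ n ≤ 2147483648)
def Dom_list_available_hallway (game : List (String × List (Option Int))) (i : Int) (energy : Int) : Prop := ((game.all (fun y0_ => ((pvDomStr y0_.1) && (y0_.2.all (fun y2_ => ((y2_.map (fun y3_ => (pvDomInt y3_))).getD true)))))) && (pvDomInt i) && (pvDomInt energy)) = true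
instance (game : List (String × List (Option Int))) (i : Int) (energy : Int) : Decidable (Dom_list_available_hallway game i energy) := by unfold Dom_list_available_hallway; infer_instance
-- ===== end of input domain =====

-- B replaces A's FIFO queue of (index, direction, cost) triples by a distance loop with two
-- alive flags (left handled before right at each distance); objective: simpler. Return-value
-- equivalence only (both are generators in Python; the value compared is the yielded list).

-- ===== PORT A =====
-- A's while-loop over the queue `nexts`; fuel only makes the recursion total (2*len+4 is
-- enough for every queue the wrapper builds; the exhaustion branch is unreachable there).
def pvALoop (hallway : List (Option Int)) (energy : Int) : Nat → List (Int × Int × Int) → List (Int × Int)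
  | _, [] => []
  | 0, _ :: _ => []
  | fuel+1, (i, d, cost) :: rest =>
    match PySem.List.pyGet? hallway i with
    | some (some _) => pvALoop hallway energy fuel rest          -- hallway[i] is not None: continue
    | some none =>
        (i, cost) :: pvALoop hallway energy fuel
          (rest ++ (if 0 ≤ i + d ∧ i + d < (hallway.length : Int) then [(i + d, d, cost + energy)] else []))
    | none => []                                                  -- IndexError: unreachable from the wrapper

def list_available_hallway (game : List (String × List (Option Int))) (i : Int) (energy : Int) : List (Int × Int) :=
  match game.lookup "hallway" with                                -- game['hallway'] (first match = dict lookup)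
  | none => []                                                    -- KeyError: excluded by Pre_
  | some hallway =>
    let n : Int := (hallway.length : Int)
    let nexts : List (Int × Int × Int) :=
      (if 0 < i ∧ i < n then [(i - 1, -1, energy)] else [])
      ++ (if 0 ≤ i ∧ i < n - 1 then [(i + 1, 1, energy)] else [])
    (i, 0) :: pvALoop hallway energy (2 * hallway.length + 4) nexts

-- ===== PORT B =====
-- B's loop body, one side each: (yielded pairs, updated alive flag) for the current step.
def pvBStepL (hallway : List (Option Int)) (i energy : Int) (left : Bool) (step : Int) : List (Int × Int) × Bool :=
  if left then
    if i - step < 0 then ([], false)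
    else match PySem.List.pyGet? hallway (i - step) with
      | some none => ([(i - step, step * energy)], true)   -- hallway[j] is None: yield
      | _ => ([], false)                                   -- occupied (out of range unreachable: left implies i < len)
  else ([], false)

def pvBStepR (hallway : List (Option Int)) (i energy n : Int) (right : Bool) (step : Int) : List (Int × Int) × Bool :=
  if right then
    if n ≤ i + step then ([], false)
    else match PySem.List.pyGet? hallway (i + step) with
      | some none => ([(i + step, step * energy)], true)
      | _ => ([], false)
  else ([], false)

-- B's while-loop: step 1,2,… while a flag is alive; fuel len+2 only makes it total (enough
-- for every call the wrapper makes).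
def pvBLoop (hallway : List (Option Int)) (i energy n : Int) : Bool → Bool → Int → Nat → List (Int × Int)
  | _, _, _, 0 => []
  | left, right, step, fuel+1 =>
    if left || right then
      (pvBStepL hallway i energy left step).1 ++ (pvBStepR hallway i energy n right step).1
        ++ pvBLoop hallway i energy n (pvBStepL hallway i energy left step).2
             (pvBStepR hallway i energy n right step).2 (step + 1) fuel
    else []

def list_available_hallway_alt (game : List (String × List (Option Int))) (i : Int) (energy : Int) : List (Int × Int) :=
  match game.lookup "hallway" with
  | none => []
  | some hallway =>
    let n : Int := (hallway.length : Int)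
    (i, 0) :: pvBLoop hallway i energy n (decide (0 < i ∧ i < n)) (decide (0 ≤ i ∧ i < n - 1)) 1 (hallway.length + 2)

-- ===== PRECONDITION & SPEC =====
-- Pre_ excludes exactly the inputs where A raises KeyError: no 'hallway' key in the dict.
def Pre_list_available_hallway (game : List (String × List (Option Int))) (i : Int) (energy : Int) : Prop :=
  (game.lookup "hallway").isSome
instance (game : List (String × List (Option Int))) (i : Int) (energy : Int) : Decidable (Pre_list_available_hallway game i energy) := by unfold Pre_list_available_hallway; infer_instance

def pvWitness_list_available_hallway : (List (String × List (Option Int))) × Int × Int :=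
  ([("hallway", [none, some 5, none, none])], 2, 10)

def Spec_list_available_hallway (game : List (String × List (Option Int))) (i : Int) (energy : Int) (out : List (Int × Int)) : Prop := out = list_available_hallway_alt game i energy
instance (game : List (String × List (Option Int))) (i : Int) (energy : Int) (out : List (Int × Int)) : Decidable (Spec_list_available_hallway game i energy out) := by unfold Spec_list_available_hallway; infer_instance

-- ===== CLAIM (what is proved, stated in full; the proofs are below) =====
def Claim_equal_list_available_hallway : Prop := ∀ (game : List (String × List (Option Int))) (i : Int) (energy : Int), Dom_list_available_hallway game i energy → Pre_list_available_hallway game i energy → Spec_list_available_hallway game i energy (list_available_hallway game i energy)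

-- ===== LEMMAS AND PROOFS =====

-- A's queue at the top of B's step-`s` iteration: the distance-s left element (present iff the
-- left scan is alive and i-s is in range) followed by the distance-s right element.
def pvQ (i energy n : Int) (left right : Bool) (s : Int) : List (Int × Int × Int) :=
  (if left = true ∧ 0 ≤ i - s then [(i - s, -1, s * energy)] else [])
  ++ (if right = true ∧ i + s < n then [(i + s, 1, s * energy)] else [])

theorem pvALoop_nil (hallway : List (Option Int)) (energy : Int) (fA : Nat) :
    pvALoop hallway energy fA [] = [] := by cases fA <;> rfl

theorem pvPopFree (hallway : List (Option Int)) (energy j d c : Int) (f : Nat) (rest : List (Int × Int × Int))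
    (h : PySem.List.pyGet? hallway j = some none) :
    pvALoop hallway energy (f + 1) ((j, d, c) :: rest) =
      (j, c) :: pvALoop hallway energy f
        (rest ++ (if 0 ≤ j + d ∧ j + d < (hallway.length : Int) then [(j + d, d, c + energy)] else [])) := by
  simp [pvALoop, h]

theorem pvPopOcc (hallway : List (Option Int)) (energy j d c v : Int) (f : Nat) (rest : List (Int × Int × Int))
    (h : PySem.List.pyGet? hallway j = some (some v)) :
    pvALoop hallway energy (f + 1) ((j, d, c) :: rest) = pvALoop hallway energy f rest := by
  simp [pvALoop, h]

theorem pvMain (hallway : List (Option Int)) (i energy : Int) (n : Int) (hn : n = (hallway.length : Int)) :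
    ∀ (fB : Nat) (s : Int) (left right : Bool) (fA : Nat),
      2 * fB ≤ fA →
      (left = true → 1 ≤ s ∧ 0 < i ∧ i < n ∧ i + 2 - s ≤ (fB : Int)) →
      (right = true → 1 ≤ s ∧ 0 ≤ i ∧ n - i - s + 1 ≤ (fB : Int)) →
      pvALoop hallway energy fA (pvQ i energy n left right s) = pvBLoop hallway i energy n left right s fB := by
  intro fB
  induction fB with
  | zero =>
    intro s left right fA hfa hl hr
    have hA : ¬(left = true ∧ 0 ≤ i - s) := by rintro ⟨h1, h2⟩; have := hl h1; omega
    have hB : ¬(right = true ∧ i + s < n) := by rintro ⟨h1, h2⟩; have := hr h1; omega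
    simp only [pvQ, if_neg hA, if_neg hB, List.append_nil]
    rw [pvALoop_nil]; rfl
  | succ f IH =>
    intro s left right fA hfa hl hr
    obtain ⟨fA', rfl⟩ : ∃ x, fA = x + 2 := ⟨fA - 2, by omega⟩
    have h2f : 2 * f ≤ fA' := by omega
    -- the right half of one iteration, after the left element has been processed:
    have hR : ∀ (left' : Bool) (fA2 : Nat), 2 * f ≤ fA2 →
        (left' = true → 1 ≤ s + 1 ∧ 0 < i ∧ i < n ∧ i + 2 - (s + 1) ≤ (f : Int)) →
        pvALoop hallway energy (fA2 + 1)
          ((if right = true ∧ i + s < n then [(i + s, 1, s * energy)] else [])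
            ++ (if left' = true ∧ 0 ≤ i - (s + 1) then [(i - (s + 1), -1, (s + 1) * energy)] else []))
        = (pvBStepR hallway i energy n right s).1
          ++ pvBLoop hallway i energy n left' (pvBStepR hallway i energy n right s).2 (s + 1) f := by
      intro left' fA2 hfa2 hl'
      cases right with
      | false =>
        have hstep : pvBStepR hallway i energy n false s = ([], false) := rfl
        rw [hstep]
        have h := IH (s + 1) left' false (fA2 + 1) (by omega) hl' (by simp)
        simpa [pvQ] using h
      | true =>
        obtain ⟨hs', hi0', hfr⟩ := hr rfl
        by_cases hrs : n ≤ i + s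
        · rw [if_neg (by rintro ⟨_, h⟩; omega)]
          have hstep : pvBStepR hallway i energy n true s = ([], false) := by
            simp [pvBStepR, hrs]
          rw [hstep]
          have h := IH (s + 1) left' false (fA2 + 1) (by omega) hl' (by simp)
          simpa [pvQ] using h
        · push Not at hrs
          rw [if_pos ⟨rfl, hrs⟩]
          obtain ⟨o, ho⟩ : ∃ o, PySem.List.pyGet? hallway (i + s) = some o :=
            ⟨_, PySem.List.pyGet?_eq_some_getElem hallway (by omega) (by omega)⟩
          cases o with
          | some v =>
            have hstep : pvBStepR hallway i energy n true s = ([], false) := by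
              simp [pvBStepR, ho, show ¬ n ≤ i + s by omega]
            rw [hstep, List.singleton_append, pvPopOcc hallway energy _ _ _ v _ _ ho]
            have h := IH (s + 1) left' false fA2 hfa2 hl' (by simp)
            simpa [pvQ] using h
          | none =>
            have hstep : pvBStepR hallway i energy n true s = ([(i + s, s * energy)], true) := by
              simp [pvBStepR, ho, show ¬ n ≤ i + s by omega]
            rw [hstep, List.singleton_append, pvPopFree hallway energy _ _ _ _ _ ho]
            have hq2 : ((if left' = true ∧ 0 ≤ i - (s + 1) then [(i - (s + 1), -1, (s + 1) * energy)] else [])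
                ++ (if 0 ≤ i + s + 1 ∧ i + s + 1 < (hallway.length : Int) then [(i + s + 1, 1, s * energy + energy)] else []))
                = pvQ i energy n left' true (s + 1) := by
              unfold pvQ
              congr 1
              by_cases hc : i + (s + 1) < n
              · rw [if_pos ⟨by omega, by omega⟩, if_pos ⟨rfl, hc⟩]
                have e1 : i + s + 1 = i + (s + 1) := by ring
                have e2 : s * energy + energy = (s + 1) * energy := by ring
                rw [e1, e2]
              · rw [if_neg (by rintro ⟨_, h⟩; omega), if_neg (by rintro ⟨_, h⟩; omega)]
            rw [hq2, IH (s + 1) left' true fA2 hfa2 hl'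
                (by intro _; exact ⟨by omega, hi0', by omega⟩)]
            simp
    have hBonce : pvBLoop hallway i energy n left right s (f + 1) =
        if left || right then
          (pvBStepL hallway i energy left s).1 ++ (pvBStepR hallway i energy n right s).1
            ++ pvBLoop hallway i energy n (pvBStepL hallway i energy left s).2
                 (pvBStepR hallway i energy n right s).2 (s + 1) f
        else [] := rfl
    cases left with
    | false =>
      cases right with
      | false => simp [pvQ, pvBLoop, pvALoop_nil]
      | true =>
        rw [hBonce]
        simp only [Bool.false_or, show pvBStepL hallway i energy false s = ([], false) from rfl]
        have h := hR false (fA' + 1) (by omega) (by simp)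
        simpa [pvQ] using h
    | true =>
      obtain ⟨hs, hi0, hin, hfl⟩ := hl rfl
      rw [hBonce]
      simp only [Bool.true_or]
      by_cases hls : i - s < 0
      · have hL : pvBStepL hallway i energy true s = ([], false) := by
          simp [pvBStepL, hls]
        rw [hL]
        have h := hR false (fA' + 1) (by omega) (by simp)
        simpa [pvQ, show ¬ (0 ≤ i - s) from by omega, show ¬ s ≤ i from by omega] using h
      · push Not at hls
        obtain ⟨o, ho⟩ : ∃ o, PySem.List.pyGet? hallway (i - s) = some o :=
          ⟨_, PySem.List.pyGet?_eq_some_getElem hallway (by omega) (by omega)⟩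
        have hq : pvQ i energy n true right s = (i - s, -1, s * energy)
            :: (if right = true ∧ i + s < n then [(i + s, 1, s * energy)] else []) := by
          unfold pvQ
          rw [if_pos ⟨rfl, hls⟩, List.singleton_append]
        cases o with
        | some v =>
          have hL : pvBStepL hallway i energy true s = ([], false) := by
            simp [pvBStepL, ho, show ¬ i - s < 0 by omega]
          rw [hL, hq, show fA' + 2 = (fA' + 1) + 1 from rfl, pvPopOcc hallway energy _ _ _ v _ _ ho]
          have h := hR false fA' h2f (by simp)
          simpa using h
        | none =>
          have hL : pvBStepL hallway i energy true s = ([(i - s, s * energy)], true) := by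
            simp [pvBStepL, ho, show ¬ i - s < 0 by omega]
          rw [hL, hq, show fA' + 2 = (fA' + 1) + 1 from rfl, pvPopFree hallway energy _ _ _ _ _ ho]
          have hlp : (if 0 ≤ i - s + -1 ∧ i - s + -1 < (hallway.length : Int) then [(i - s + -1, -1, s * energy + energy)] else [])
              = (if (true : Bool) = true ∧ 0 ≤ i - (s + 1) then [(i - (s + 1), -1, (s + 1) * energy)] else []) := by
            by_cases hc : 0 ≤ i - (s + 1)
            · rw [if_pos ⟨by omega, by omega⟩, if_pos ⟨rfl, hc⟩]
              have e1 : i - s + -1 = i - (s + 1) := by ring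
              have e2 : s * energy + energy = (s + 1) * energy := by ring
              rw [e1, e2]
            · rw [if_neg (by rintro ⟨h1, _⟩; omega), if_neg (by rintro ⟨_, h1⟩; omega)]
          rw [hlp, hR true fA' h2f (by intro _; exact ⟨by omega, hi0, hin, by omega⟩)]
          simp

-- ===== VERDICT (by name: the statement is the Claim_ definition above) =====
theorem list_available_hallway_spec : Claim_equal_list_available_hallway := by
  intro game i energy hdom hpre
  unfold Spec_list_available_hallway list_available_hallway list_available_hallway_alt
  obtain ⟨hallway, hget⟩ : ∃ h, game.lookup "hallway" = some h := by
    unfold Pre_list_available_hallway at hpre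
    cases hh : game.lookup "hallway" with
    | none => rw [hh] at hpre; simp at hpre
    | some h => exact ⟨h, rfl⟩
  rw [hget]
  have hmain := pvMain hallway i energy (hallway.length : Int) rfl (hallway.length + 2) 1
      (decide (0 < i ∧ i < (hallway.length : Int))) (decide (0 ≤ i ∧ i < (hallway.length : Int) - 1))
      (2 * hallway.length + 4) (by omega)
      (by intro h; simp only [decide_eq_true_eq] at h
          exact ⟨le_refl 1, h.1, h.2, by push_cast; omega⟩)
      (by intro h; simp only [decide_eq_true_eq] at h
          exact ⟨le_refl 1, h.1, by push_cast; omega⟩)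
  simp only []
  rw [← hmain]
  have hq : ((if 0 < i ∧ i < (hallway.length : Int) then [(i - 1, -1, energy)] else [])
        ++ (if 0 ≤ i ∧ i < (hallway.length : Int) - 1 then [(i + 1, 1, energy)] else []))
      = pvQ i energy (hallway.length : Int) (decide (0 < i ∧ i < (hallway.length : Int)))
          (decide (0 ≤ i ∧ i < (hallway.length : Int) - 1)) 1 := by
    unfold pvQ
    congr 1
    · by_cases h : 0 < i ∧ i < (hallway.length : Int)
      · rw [if_pos h, if_pos ⟨by simp [h.1, h.2], by omega⟩]; norm_num
      · rw [if_neg h, if_neg]; rintro ⟨h1, h2⟩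
        simp only [decide_eq_true_eq] at h1; exact h h1
    · by_cases h : 0 ≤ i ∧ i < (hallway.length : Int) - 1
      · rw [if_pos h, if_pos ⟨by simp [h.1, h.2], by omega⟩]; norm_num
      · rw [if_neg h, if_neg]; rintro ⟨h1, h2⟩
        simp only [decide_eq_true_eq] at h1; exact h h1
  rw [hq]
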